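-- pv_equiv track=rewrite | github.com/Kakrain/StickAnimator | stickanimator.py | getHeigthFrame
-- ===== SOURCE A (Python) =====
-- def getHeigthFrame(frame):
--     minv=maxv=0
--     for p in frame:
--         if(p[2]<minv):
--             minv=p[2]
--         if(p[2]>maxv):
--             maxv=p[2]
--     return maxv-minv
-- ===== SOURCE B (Python) =====
-- def getHeigthFrame(frame):
--     zs = sorted([0] + [p[2] for p in frame])
--     return zs[-1] - zs[0]
-- ===== Notes on version B (the rewrite author's own statement) =====
-- stated objective: alternative
-- what changed: Replaces the single fused scan with two running min/max accumulators by sorting the 0-seeded z-coordinate list once and subtracting its first element from its last.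
import Mathlib
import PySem

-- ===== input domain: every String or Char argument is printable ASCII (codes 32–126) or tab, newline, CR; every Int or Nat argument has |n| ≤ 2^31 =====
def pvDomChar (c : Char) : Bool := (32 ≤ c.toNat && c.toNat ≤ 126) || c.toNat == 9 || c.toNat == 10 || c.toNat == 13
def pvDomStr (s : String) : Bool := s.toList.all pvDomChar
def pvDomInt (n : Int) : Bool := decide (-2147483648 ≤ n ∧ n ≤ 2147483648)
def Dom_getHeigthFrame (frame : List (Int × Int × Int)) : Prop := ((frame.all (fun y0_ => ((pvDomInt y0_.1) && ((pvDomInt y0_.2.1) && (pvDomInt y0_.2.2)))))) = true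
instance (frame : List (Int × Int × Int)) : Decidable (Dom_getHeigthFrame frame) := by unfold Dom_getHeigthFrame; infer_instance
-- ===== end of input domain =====

-- B sorts the 0-seeded z-coordinate list once and subtracts its first element from its last
-- (sort-then-endpoints instead of A's fused running-min/max scan; alternative, not faster).

-- ===== PORT A =====
-- fused loop: two running accumulators minv/maxv, both starting at 0
def getHeigthFrame (frame : List (Int × Int × Int)) : Int :=
  let s := frame.foldl (fun (s : Int × Int) p =>
    let minv := if p.2.2 < s.1 then p.2.2 else s.1
    let maxv := if p.2.2 > s.2 then p.2.2 else s.2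
    (minv, maxv)) (0, 0)
  s.2 - s.1

-- ===== PORT B =====
-- zs = sorted([0] + [p[2] for p in frame]); zs[-1] - zs[0]  (zs is never empty, so neither index raises)
def getHeigthFrame_alt (frame : List (Int × Int × Int)) : Int :=
  let zs := PySem.List.sorted ((0 : Int) :: frame.map (fun p => p.2.2)) (fun y => y) false
  (PySem.List.pyGet? zs (-1)).getD 0 - (PySem.List.pyGet? zs 0).getD 0

-- ===== PRECONDITION & SPEC =====
def Spec_getHeigthFrame (frame : List (Int × Int × Int)) (out : Int) : Prop := out = getHeigthFrame_alt frame
instance (frame : List (Int × Int × Int)) (out : Int) : Decidable (Spec_getHeigthFrame frame out) := by unfold Spec_getHeigthFrame; infer_instance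

-- ===== CLAIM (what is proved, stated in full; the proofs are below) =====
def Claim_equal_getHeigthFrame : Prop := ∀ (frame : List (Int × Int × Int)), Dom_getHeigthFrame frame → Spec_getHeigthFrame frame (getHeigthFrame frame)

-- ===== LEMMAS AND PROOFS =====

-- A's paired fold is the pair of a running-min and running-max fold over the z list
theorem pvFoldPair (l : List (Int × Int × Int)) : ∀ (a b : Int),
    l.foldl (fun (s : Int × Int) p =>
      let minv := if p.2.2 < s.1 then p.2.2 else s.1
      let maxv := if p.2.2 > s.2 then p.2.2 else s.2
      (minv, maxv)) (a, b)
    = ((l.map (fun p => p.2.2)).foldl min a, (l.map (fun p => p.2.2)).foldl max b) := by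
  induction l with
  | nil => intro a b; rfl
  | cons p t ih =>
      intro a b
      simp only [List.foldl_cons, List.map_cons]
      rw [ih]
      congr 1 <;> congr 1 <;> simp only [min, max] <;> split <;> split <;> omega

theorem pvFoldMinMem (l : List Int) : ∀ a : Int, l.foldl min a ∈ a :: l := by
  induction l with
  | nil => intro a; simp
  | cons b t ih =>
      intro a
      simp only [List.foldl_cons]
      have := ih (min a b)
      rcases List.mem_cons.mp this with h | h
      · rw [h]; rcases min_choice a b with hm | hm <;> simp [hm]
      · simp [h]

theorem pvFoldMinLe (l : List Int) : ∀ a : Int, ∀ x ∈ a :: l, l.foldl min a ≤ x := by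
  induction l with
  | nil => intro a x hx; simp only [List.foldl_nil]; simp at hx; omega
  | cons b t ih =>
      intro a x hx
      simp only [List.foldl_cons]
      have hfold : t.foldl min (min a b) ≤ min a b := ih (min a b) _ List.mem_cons_self
      rcases List.mem_cons.mp hx with h | h
      · rw [h]; exact le_trans hfold (min_le_left a b)
      · rcases List.mem_cons.mp h with h | h
        · rw [h]; exact le_trans hfold (min_le_right a b)
        · exact ih (min a b) x (List.mem_cons_of_mem _ h)

theorem pvFoldMaxMem (l : List Int) : ∀ a : Int, l.foldl max a ∈ a :: l := by
  induction l with
  | nil => intro a; simp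
  | cons b t ih =>
      intro a
      simp only [List.foldl_cons]
      have := ih (max a b)
      rcases List.mem_cons.mp this with h | h
      · rw [h]; rcases max_choice a b with hm | hm <;> simp [hm]
      · simp [h]

theorem pvFoldMaxGe (l : List Int) : ∀ a : Int, ∀ x ∈ a :: l, x ≤ l.foldl max a := by
  induction l with
  | nil => intro a x hx; simp only [List.foldl_nil]; simp at hx; omega
  | cons b t ih =>
      intro a x hx
      simp only [List.foldl_cons]
      have hfold : max a b ≤ t.foldl max (max a b) := ih (max a b) _ List.mem_cons_self
      rcases List.mem_cons.mp hx with h | h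
      · rw [h]; exact le_trans (le_max_left a b) hfold
      · rcases List.mem_cons.mp h with h | h
        · rw [h]; exact le_trans (le_max_right a b) hfold
        · exact ih (max a b) x (List.mem_cons_of_mem _ h)

-- xs[0] is the head on a nonempty list
theorem pvGetZeroHead (s : List Int) (h : s ≠ []) :
    PySem.List.pyGet? s 0 = some (s.head h) := by
  cases s with
  | nil => simp at h
  | cons a t => simp

-- head of a ≤-sorted list is ≤ every member
theorem pvHeadLe (s : List Int) (hp : s.Pairwise (· ≤ ·)) (h : s ≠ []) :
    ∀ x ∈ s, s.head h ≤ x := by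
  cases s with
  | nil => simp at h
  | cons a t =>
      intro x hx
      rcases List.mem_cons.mp hx with hx | hx
      · simp [hx]
      · exact (List.pairwise_cons.mp hp).1 x hx

-- every member of a ≤-sorted list is ≤ its last element
theorem pvLeLast (s : List Int) (hp : s.Pairwise (· ≤ ·)) (h : s ≠ []) :
    ∀ x ∈ s, x ≤ s.getLast h := by
  induction s with
  | nil => simp at h
  | cons a t ih =>
      intro x hx
      cases t with
      | nil => simp at hx; simp [hx]
      | cons b u =>
          rcases List.mem_cons.mp hx with hx | hx
          · subst hx
            rw [List.getLast_cons (by simp)]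
            exact le_trans ((List.pairwise_cons.mp hp).1 _ (List.getLast_mem _))
              (le_refl _)
          · rw [List.getLast_cons (by simp)]
            exact ih (List.pairwise_cons.mp hp).2 (by simp) x hx

-- ===== VERDICT (by name: the statement is the Claim_ definition above) =====
theorem getHeigthFrame_spec : Claim_equal_getHeigthFrame := by
  intro frame _
  unfold Spec_getHeigthFrame getHeigthFrame getHeigthFrame_alt
  set l := frame.map (fun p => p.2.2) with hl
  set s := PySem.List.sorted ((0 : Int) :: l) (fun y => y) false with hs
  have hperm : s.Perm ((0 : Int) :: l) := PySem.List.sorted_perm _ _ _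
  have hpair : s.Pairwise (· ≤ ·) := PySem.List.sorted_pairwise ((0 : Int) :: l) (fun y => y)
  have hne : s ≠ [] := by
    intro h
    have := (PySem.List.sorted_eq_nil_iff ((0 : Int) :: l) (fun y => y) false).mp h
    simp at this
  -- s[-1] and s[0]
  have hget0 : PySem.List.pyGet? s 0 = some (s.head hne) := pvGetZeroHead s hne
  have hgetm1 : PySem.List.pyGet? s (-1) = some (s.getLast hne) := by
    rw [PySem.List.pyGet?_neg_one, List.getLast?_eq_getLast_of_ne_nil hne]
  -- head s = foldl min 0 l
  have hmin : s.head hne = l.foldl min 0 := by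
    have h1 : s.head hne ≤ l.foldl min 0 :=
      pvHeadLe s hpair hne _ (hperm.symm.mem_iff.mp (pvFoldMinMem l 0))
    have h2 : l.foldl min 0 ≤ s.head hne :=
      pvFoldMinLe l 0 _ (hperm.mem_iff.mp (List.head_mem hne))
    omega
  have hmax : s.getLast hne = l.foldl max 0 := by
    have h1 : l.foldl max 0 ≤ s.getLast hne :=
      pvLeLast s hpair hne _ (hperm.symm.mem_iff.mp (pvFoldMaxMem l 0))
    have h2 : s.getLast hne ≤ l.foldl max 0 :=
      pvFoldMaxGe l 0 _ (hperm.mem_iff.mp (List.getLast_mem hne))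
    omega
  simp only [pvFoldPair, hget0, hgetm1, Option.getD_some, hmin, hmax, ← hl]
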